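-- pv_equiv track=rewrite | github.com/WhaleFallOf52Hz/VocalTS | Slice_wav_for_DDSP_SVC.py | compute_slice_ranges
-- ===== SOURCE A (Python) =====
-- def compute_slice_ranges(total_frames: int, slice_frames: int, discard_short: bool):
--     ranges = []
--     start = 0
--     while start < total_frames:
--         end = min(start + slice_frames, total_frames)
--         if end - start < slice_frames and discard_short:
--             break
--         ranges.append((start, end))
--         start += slice_frames
--     return ranges
-- ===== SOURCE B (Python) =====
-- def compute_slice_ranges(total_frames: int, slice_frames: int, discard_short: bool):
--     if total_frames <= 0:
--         return []
--     n_full = total_frames // slice_frames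
--     ranges = [(i * slice_frames, (i + 1) * slice_frames) for i in range(n_full)]
--     if not discard_short and total_frames % slice_frames != 0:
--         ranges.append((n_full * slice_frames, total_frames))
--     return ranges
-- ===== Notes on version B (the rewrite author's own statement) =====
-- stated objective: simpler
-- what changed: Replaces the running-start while loop (with min and break) by a closed-form count: n_full = total_frames // slice_frames full ranges built by a comprehension, plus an arithmetically-detected partial tail when not discard_short.
import Mathlib
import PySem

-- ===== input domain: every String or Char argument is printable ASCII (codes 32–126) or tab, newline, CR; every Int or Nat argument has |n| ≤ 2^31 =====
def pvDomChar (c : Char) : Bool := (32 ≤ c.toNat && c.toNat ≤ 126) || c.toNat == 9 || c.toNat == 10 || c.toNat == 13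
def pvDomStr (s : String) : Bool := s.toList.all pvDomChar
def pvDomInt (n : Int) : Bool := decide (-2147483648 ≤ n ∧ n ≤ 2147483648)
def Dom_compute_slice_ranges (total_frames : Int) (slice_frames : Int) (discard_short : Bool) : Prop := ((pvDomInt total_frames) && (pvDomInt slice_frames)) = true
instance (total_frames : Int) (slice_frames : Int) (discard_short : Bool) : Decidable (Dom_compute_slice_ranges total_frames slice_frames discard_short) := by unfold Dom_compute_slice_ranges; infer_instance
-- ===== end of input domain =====

-- B computes the same slice list by closed-form arithmetic (count of full slices + optional tail)
-- instead of A's running-start while loop; objective: simpler.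

-- ===== PORT A =====
-- A's while loop, transliterated with fuel; inside Pre_ (slice_frames > 0 or total_frames ≤ 0)
-- the fuel total_frames.toNat + 1 is enough, so the fuel guard is never the exit taken by the loop.
def csrLoopA (total_frames slice_frames : Int) (discard_short : Bool) :
    Nat → Int → List (Int × Int) → List (Int × Int)
  | 0, _, acc => acc
  | fuel + 1, start, acc =>
    if start < total_frames then
      let e := min (start + slice_frames) total_frames
      if e - start < slice_frames ∧ discard_short then acc
      else csrLoopA total_frames slice_frames discard_short fuel (start + slice_frames)
             (acc ++ [(start, e)])
    else acc

def compute_slice_ranges (total_frames : Int) (slice_frames : Int) (discard_short : Bool) : List (Int × Int) :=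
  csrLoopA total_frames slice_frames discard_short (total_frames.toNat + 1) 0 []

-- ===== PORT B =====
def compute_slice_ranges_alt (total_frames : Int) (slice_frames : Int) (discard_short : Bool) : List (Int × Int) :=
  if total_frames ≤ 0 then []
  else
    let n_full := PySem.Int.floordiv total_frames slice_frames
    let ranges := (PySem.List.pyRange 0 n_full 1).map
      (fun i => (i * slice_frames, (i + 1) * slice_frames))
    if ¬ discard_short ∧ PySem.Int.mod total_frames slice_frames ≠ 0 then
      ranges ++ [(n_full * slice_frames, total_frames)]
    else ranges

-- ===== PRECONDITION & SPEC =====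
-- Pre_ excludes slice_frames ≤ 0 with total_frames > 0: there Python A loops forever (never
-- returns a value), while B divides by slice_frames.
def Pre_compute_slice_ranges (total_frames : Int) (slice_frames : Int) (discard_short : Bool) : Prop :=
  0 < slice_frames ∨ total_frames ≤ 0
instance (total_frames : Int) (slice_frames : Int) (discard_short : Bool) : Decidable (Pre_compute_slice_ranges total_frames slice_frames discard_short) := by unfold Pre_compute_slice_ranges; infer_instance
def pvWitness_compute_slice_ranges : Int × Int × Bool := (7, 3, false)

def Spec_compute_slice_ranges (total_frames : Int) (slice_frames : Int) (discard_short : Bool) (out : List (Int × Int)) : Prop := out = compute_slice_ranges_alt total_frames slice_frames discard_short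
instance (total_frames : Int) (slice_frames : Int) (discard_short : Bool) (out : List (Int × Int)) : Decidable (Spec_compute_slice_ranges total_frames slice_frames discard_short out) := by unfold Spec_compute_slice_ranges; infer_instance

-- ===== CLAIM (what is proved, stated in full; the proofs are below) =====
def Claim_equal_compute_slice_ranges : Prop := ∀ (total_frames : Int) (slice_frames : Int) (discard_short : Bool), Dom_compute_slice_ranges total_frames slice_frames discard_short → Pre_compute_slice_ranges total_frames slice_frames discard_short → Spec_compute_slice_ranges total_frames slice_frames discard_short (compute_slice_ranges total_frames slice_frames discard_short)

-- ===== LEMMAS AND PROOFS =====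

-- If the loop's entry test fails, any fuel returns the accumulator.
theorem csrLoopA_stop (t s : Int) (d : Bool) (start : Int) (acc : List (Int × Int))
    (fuel : Nat) (h : ¬ start < t) : csrLoopA t s d fuel start acc = acc := by
  cases fuel with
  | zero => rfl
  | succ fuel => rw [csrLoopA, if_neg h]

-- Main loop invariant: with 0 < s, start = k*s for 0 ≤ k ≤ n := t/s, and enough fuel,
-- the loop produces acc ++ (remaining full ranges from k) ++ (optional tail).
theorem csrLoopA_inv (t s : Int) (hs : 0 < s) (d : Bool) :
    ∀ (fuel : Nat) (k : Int) (acc : List (Int × Int)),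
      0 ≤ k → k ≤ t / s → (t / s - k).toNat < fuel →
      csrLoopA t s d fuel (k * s) acc =
        acc ++ (PySem.List.pyRange k (t / s) 1).map
                 (fun i => (i * s, (i + 1) * s)) ++
          (if ¬ d ∧ t % s ≠ 0 ∧ (t / s) * s < t then [((t / s) * s, t)] else []) := by
  intro fuel
  induction fuel with
  | zero => intro k acc _ _ hf; omega
  | succ fuel ih =>
    intro k acc hk0 hkn hf
    have hn0 : 0 ≤ t / s := le_trans hk0 hkn
    have hns : (t / s) * s ≤ t := Int.ediv_mul_le t (by omega)
    have hts : t < (t / s) * s + s := by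
      have := Int.lt_ediv_add_one_mul_self t hs
      nlinarith [this]
    have heq : t % s = t - (t / s) * s := by
      have := Int.emod_def t s; linarith
    by_cases hlt : k < t / s
    · -- full slice: k*s < t and t - k*s ≥ s
      have h1 : k * s + s ≤ (t / s) * s := by
        have : (k + 1) * s ≤ (t / s) * s := by
          apply mul_le_mul_of_nonneg_right _ (le_of_lt hs); omega
        linarith [this]
      have hstart : k * s < t := by nlinarith
      have hmin : min (k * s + s) t = k * s + s := by
        apply min_eq_left; omega
      rw [csrLoopA]
      simp only [if_pos hstart, hmin]
      have hnotshort : ¬ (k * s + s - k * s < s ∧ d = true) := by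
        intro h; omega
      rw [if_neg hnotshort]
      have hrec : k * s + s = (k + 1) * s := by ring
      rw [hrec, ih (k + 1) (acc ++ [(k * s, (k + 1) * s)]) (by omega) (by omega) (by omega)]
      rw [PySem.List.pyRange_one_cons hlt]
      simp only [List.map_cons, List.append_assoc, List.cons_append, List.nil_append]
    · -- k = t/s : at most the short tail remains
      have hk : k = t / s := le_antisymm hkn (not_lt.mp hlt)
      subst hk
      rw [PySem.List.pyRange_one_eq_nil (le_refl _)]
      simp only [List.map_nil, List.append_nil]
      rw [csrLoopA]
      by_cases hstart : (t / s) * s < t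
      · simp only [if_pos hstart]
        have hmin : min ((t / s) * s + s) t = t := min_eq_right (by linarith)
        rw [hmin]
        have hmod : t % s ≠ 0 := by intro h0; rw [h0] at heq; linarith
        cases d with
        | true =>
          rw [if_pos (⟨by linarith, rfl⟩ : t - (t / s) * s < s ∧ true = true)]
          rw [if_neg (by simp)]
          simp
        | false =>
          rw [if_neg (by simp)]
          rw [csrLoopA_stop t s false ((t / s) * s + s) _ fuel (by intro h; linarith)]
          rw [if_pos (by exact ⟨by simp, hmod, hstart⟩)]
      · simp only [if_neg hstart]
        have hmodz : ¬ ((t / s) * s < t) := hstart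
        rw [if_neg (by rintro ⟨-, -, h⟩; exact hmodz h)]
        simp

-- ===== VERDICT (by name: the statement is the Claim_ definition above) =====
theorem compute_slice_ranges_spec : Claim_equal_compute_slice_ranges := by
  intro t s d _ hpre
  unfold Spec_compute_slice_ranges compute_slice_ranges compute_slice_ranges_alt
  by_cases ht : t ≤ 0
  · rw [if_pos ht, csrLoopA_stop t s d 0 [] _ (by omega)]
  · have hs : 0 < s := by rcases hpre with h | h <;> omega
    rw [if_neg ht]
    have hfuel : (t / s - 0).toNat < t.toNat + 1 := by
      have h1 : t / s ≤ t := Int.ediv_le_self s (by omega)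
      omega
    have hinv := csrLoopA_inv t s hs d (t.toNat + 1) 0 [] (le_refl 0) (Int.ediv_nonneg (by omega) (by omega)) hfuel
    rw [zero_mul] at hinv
    rw [hinv]
    rw [PySem.Int.floordiv_eq_ediv_of_pos hs, PySem.Int.mod_eq_emod_of_pos hs]
    have heq : t % s = t - (t / s) * s := by
      have := Int.emod_def t s; linarith
    have hns : (t / s) * s ≤ t := Int.ediv_mul_le t (by omega)
    simp only [List.nil_append]
    by_cases hC : (¬ d = true) ∧ t % s ≠ 0
    · have hlt : (t / s) * s < t := by
        have hpos : 0 < t % s := lt_of_le_of_ne (Int.emod_nonneg t (by omega)) (Ne.symm hC.2)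
        linarith
      rw [if_pos (⟨hC.1, hC.2, hlt⟩ : ¬ d = true ∧ t % s ≠ 0 ∧ (t / s) * s < t), if_pos hC]
    · rw [if_neg (fun h => hC ⟨h.1, h.2.1⟩), if_neg hC]
      simp
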